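-- pv_equiv track=rewrite | github.com/IvoNet/advent-of-code | 2015/day_03/day_03.py | part_2
-- ===== SOURCE A (Python) =====
-- from collections import defaultdict
--
-- class Santa:
--
--     def __init__(self) -> None:
--         self.locations = defaultdict(int)
--         self.north = 0
--         self.east = 0
--         self.south = 0
--         self.west = 0
--         self.locations[(0, 0, 0, 0)] = 1
--
--     def go(self, c: str):
--         if c == "^":
--             if self.south > 0:
--                 self.south -= 1
--             else:
--                 self.north += 1
--         elif c == "v":
--             if self.north > 0:
--                 self.north -= 1
--             else:
--                 self.south += 1
--         elif c == "<":
--             if self.east > 0: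
--                 self.east -= 1
--             else:
--                 self.west += 1
--         elif c == ">":
--             if self.west > 0:
--                 self.west -= 1
--             else:
--                 self.east += 1
--         else:
--             raise ValueError(f"Unknown direction [{c}]")
--         self.locations[(self.north, self.east, self.south, self.west)] += 1
--
-- def part_2(source):
--     santa = Santa()
--     robo_santa = Santa()
--     flip = True
--     for c in source:
--         if flip:
--             santa.go(c)
--         else:
--             robo_santa.go(c)
--         flip = not flip
--     locations = santa.locations
--     for k, v in robo_santa.locations.items():
--         locations[k] += v
--     return len(locations)
-- ===== SOURCE B (Python) =====
-- def _delta(c):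
--     if c == "^":
--         return (0, 1)
--     if c == "v":
--         return (0, -1)
--     if c == "<":
--         return (-1, 0)
--     if c == ">":
--         return (1, 0)
--     raise ValueError(f"Unknown direction [{c}]")
--
--
-- def _path(ds):
--     """Prefix-sum walk from the origin: the successive positions after each move."""
--     x = y = 0
--     pts = []
--     for dx, dy in ds:
--         x += dx
--         y += dy
--         pts.append((x, y))
--     return pts
--
--
-- def part_2(source):
--     deltas = [_delta(c) for c in source]
--     visited = {(0, 0)}
--     visited.update(_path(deltas[0::2]))   # santa's independent walk
--     visited.update(_path(deltas[1::2]))   # robo-santa's independent walk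
--     return len(visited)
-- ===== Notes on version B (the rewrite author's own statement) =====
-- stated objective: alternative
-- what changed: Instead of A's single interleaved simulation of two stateful Santa objects (four directional counters each, two location dicts merged at the end), B first translates the whole string to deltas, deinterleaves it by slicing into the even and odd move lists, computes each santa's walk independently as a prefix-sum path, and counts the union of the two paths plus the origin in one set.
import Mathlib
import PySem

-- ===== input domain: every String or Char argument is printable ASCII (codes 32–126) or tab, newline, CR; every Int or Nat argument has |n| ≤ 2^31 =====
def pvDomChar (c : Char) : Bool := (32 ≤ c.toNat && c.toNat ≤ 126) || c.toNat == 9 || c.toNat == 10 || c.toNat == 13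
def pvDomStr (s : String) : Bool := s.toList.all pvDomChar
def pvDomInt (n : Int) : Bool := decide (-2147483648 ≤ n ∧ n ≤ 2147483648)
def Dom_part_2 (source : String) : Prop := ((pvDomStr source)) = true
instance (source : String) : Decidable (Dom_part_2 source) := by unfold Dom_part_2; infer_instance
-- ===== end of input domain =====

-- B replaces A's interleaved simulation of two stateful Santa objects (directional counters,
-- two location dicts, a final merge pass) by staged passes: translate to deltas, deinterleave
-- by even/odd slicing, compute each santa's prefix-sum path independently, count one set union.
-- ===== PORT A =====
structure SantaSt where
  locations : PySem.Dict (Int × Int × Int × Int) Int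
  north : Int
  east : Int
  south : Int
  west : Int
deriving Repr, DecidableEq

def santaInit : SantaSt :=
  { locations := PySem.Dict.empty.insert (0, 0, 0, 0) 1
    north := 0, east := 0, south := 0, west := 0 }

-- Santa.go: counter update (ValueError = none), then locations[(n,e,s,w)] += 1 (defaultdict = modify _ 0)
def santaGo (st : SantaSt) (c : Char) : Option SantaSt :=
  (if c = '^' then
    some (if st.south > 0 then { st with south := st.south - 1 } else { st with north := st.north + 1 })
  else if c = 'v' then
    some (if st.north > 0 then { st with north := st.north - 1 } else { st with south := st.south + 1 })
  else if c = '<' then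
    some (if st.east > 0 then { st with east := st.east - 1 } else { st with west := st.west + 1 })
  else if c = '>' then
    some (if st.west > 0 then { st with west := st.west - 1 } else { st with east := st.east + 1 })
  else none).map (fun s =>
    { s with locations := s.locations.modify (s.north, s.east, s.south, s.west) 0 (· + 1) })

def stepA (acc : Option (SantaSt × SantaSt × Bool)) (c : Char) : Option (SantaSt × SantaSt × Bool) :=
  match acc with
  | none => none
  | some (santa, robo, flip) =>
    if flip then (santaGo santa c).map (fun s => (s, robo, !flip))
    else (santaGo robo c).map (fun r => (santa, r, !flip))

def part_2 (source : String) : Int :=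
  match source.toList.foldl stepA (some (santaInit, santaInit, true)) with
  | none => 0
  | some (santa, robo, _) =>
    -- locations = santa.locations; for k, v in robo_santa.locations.items(): locations[k] += v
    ((robo.locations.items.foldl
        (fun d kv => d.modify kv.1 0 (· + kv.2)) santa.locations).size : Int)

-- ===== PORT B =====
-- _delta(c); ValueError = none
def deltaB (c : Char) : Option (Int × Int) :=
  if c = '^' then some (0, 1)
  else if c = 'v' then some (0, -1)
  else if c = '<' then some (-1, 0)
  else if c = '>' then some (1, 0)
  else none

-- [_delta(c) for c in source]: none as soon as any character is invalid
def deltasB (cs : List Char) : Option (List (Int × Int)) :=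
  cs.foldr (fun c acc =>
    match deltaB c, acc with
    | some d, some l => some (d :: l)
    | _, _ => none) (some [])

-- _path(ds): prefix-sum walk from the origin
def pathB (ds : List (Int × Int)) : List (Int × Int) :=
  (ds.foldl (fun (st : (Int × Int) × List (Int × Int)) d =>
    let p := (st.1.1 + d.1, st.1.2 + d.2)
    (p, st.2 ++ [p])) ((0, 0), [])).2

-- ds[0::2] (and, applied to ds.drop 1, ds[1::2]): hand port of the step-2 slice, exact —
-- it keeps exactly the elements at even indices of its argument
def everyOther {α : Type} : List α → List α
  | [] => []
  | [x] => [x]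
  | x :: _ :: t => x :: everyOther t

def part_2_alt (source : String) : Int :=
  match deltasB source.toList with
  | none => 0
  | some ds =>
    ((PySem.Set.update
        (PySem.Set.update (PySem.Set.ofList [((0 : Int), (0 : Int))])
          (pathB (everyOther ds)))
        (pathB (everyOther (ds.drop 1)))).length : Int)

-- ===== PRECONDITION & SPEC =====
-- Pre_ excludes exactly the inputs containing a character other than ^ v < >, on which A raises ValueError.
def Pre_part_2 (source : String) : Prop :=
  (source.toList.all (fun c => c == '^' || c == 'v' || c == '<' || c == '>')) = true
instance (source : String) : Decidable (Pre_part_2 source) := by unfold Pre_part_2; infer_instance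
def pvWitness_part_2 : String := "^v<>^^vv"
def Spec_part_2 (source : String) (out : Int) : Prop := out = part_2_alt source
instance (source : String) (out : Int) : Decidable (Spec_part_2 source out) := by unfold Spec_part_2; infer_instance

-- ===== CLAIM (what is proved, stated in full; the proofs are below) =====
def Claim_equal_part_2 : Prop := ∀ (source : String), Dom_part_2 source → Pre_part_2 source → Spec_part_2 source (part_2 source)

-- ===== LEMMAS AND PROOFS =====

-- encoding of a B-position as A's counter quadruple
def enc (p : Int × Int) : Int × Int × Int × Int :=
  (max p.2 0, max p.1 0, max (-p.2) 0, max (-p.1) 0)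

lemma enc_inj : Function.Injective enc := by
  rintro ⟨x, y⟩ ⟨x', y'⟩ h
  simp only [enc, Prod.mk.injEq] at h
  have : x = x' ∧ y = y' := by omega
  simp [this.1, this.2]

lemma mem_map_enc {w : List (Int × Int)} {p : Int × Int} : enc p ∈ w.map enc ↔ p ∈ w := by
  constructor
  · rintro h
    rcases List.mem_map.mp h with ⟨q, hq, he⟩
    exact (enc_inj he.symm) ▸ hq
  · exact fun h => List.mem_map_of_mem h

-- one santa's A-state tracks one position and a ghost list of its visited positions
def SRel (s : SantaSt) (p : Int × Int) (w : List (Int × Int)) : Prop :=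
  s.north = max p.2 0 ∧ s.east = max p.1 0 ∧ s.south = max (-p.2) 0 ∧ s.west = max (-p.1) 0 ∧
  s.locations.keys = w.map enc ∧ w.Nodup

-- the proof-side path: successive positions of a walk starting at p
def pathFrom (p : Int × Int) : List (Int × Int) → List (Int × Int)
  | [] => []
  | d :: t => (p.1 + d.1, p.2 + d.2) :: pathFrom (p.1 + d.1, p.2 + d.2) t

def dlt (c : Char) : Int × Int := (deltaB c).getD (0, 0)

lemma santaGo_rel {s : SantaSt} {p : Int × Int} {w : List (Int × Int)} {c : Char} {d : Int × Int}
    (hd : deltaB c = some d) (hr : SRel s p w) :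
    ∃ s', santaGo s c = some s' ∧
      SRel s' (p.1 + d.1, p.2 + d.2) (PySem.Set.add w (p.1 + d.1, p.2 + d.2)) := by
  obtain ⟨hn, he, hs, hw, hk, hnd⟩ := hr
  have key : ∀ s' : SantaSt, s'.locations = s.locations →
      s'.north = max (p.2 + d.2) 0 → s'.east = max (p.1 + d.1) 0 →
      s'.south = max (-(p.2 + d.2)) 0 → s'.west = max (-(p.1 + d.1)) 0 →
      SRel { s' with locations := s'.locations.modify (s'.north, s'.east, s'.south, s'.west) 0 (· + 1) }
        (p.1 + d.1, p.2 + d.2) (PySem.Set.add w (p.1 + d.1, p.2 + d.2)) := by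
    intro s' hl hn' he' hs' hw'
    refine ⟨hn', he', hs', hw', ?_, PySem.Set.nodup_add w _ hnd⟩
    have hkey : (s'.north, s'.east, s'.south, s'.west) = enc (p.1 + d.1, p.2 + d.2) := by
      simp [enc, hn', he', hs', hw']
    rw [PySem.Dict.keys_modify, hkey, hl]
    by_cases hmem : (p.1 + d.1, p.2 + d.2) ∈ w
    · have hcon : (PySem.Dict.contains s.locations (enc (p.1 + d.1, p.2 + d.2))) = true := by
        rw [PySem.Dict.contains_iff_mem_keys, hk]
        exact mem_map_enc.mpr hmem
      rw [PySem.Dict.keys_insert_of_contains _ _ hcon, hk, PySem.Set.add_of_mem hmem]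
    · have hcon : (PySem.Dict.contains s.locations (enc (p.1 + d.1, p.2 + d.2))) = false := by
        rw [Bool.eq_false_iff]
        intro hcon
        exact hmem (mem_map_enc.mp (hk ▸ (PySem.Dict.contains_iff_mem_keys _ _).mp hcon))
      rw [PySem.Dict.keys_insert_of_not_contains _ _ hcon, hk,
        PySem.Set.add_of_not_mem hmem, List.map_append]
      simp
  by_cases h1 : c = '^'
  · subst h1
    simp only [deltaB, Char.reduceEq, reduceIte, Option.some.injEq] at hd
    subst hd
    simp only [santaGo, Char.reduceEq, reduceIte, Option.map_some]
    by_cases hpos : s.south > 0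
    · rw [if_pos hpos]
      exact ⟨_, rfl, key _ rfl (by simp; omega) (by simp; omega) (by simp; omega) (by simp; omega)⟩
    · rw [if_neg hpos]
      exact ⟨_, rfl, key _ rfl (by simp; omega) (by simp; omega) (by simp; omega) (by simp; omega)⟩
  by_cases h2 : c = 'v'
  · subst h2
    simp only [deltaB, Char.reduceEq, reduceIte, Option.some.injEq] at hd
    subst hd
    simp only [santaGo, Char.reduceEq, reduceIte, Option.map_some]
    by_cases hpos : s.north > 0
    · rw [if_pos hpos]
      exact ⟨_, rfl, key _ rfl (by simp; omega) (by simp; omega) (by simp; omega) (by simp; omega)⟩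
    · rw [if_neg hpos]
      exact ⟨_, rfl, key _ rfl (by simp; omega) (by simp; omega) (by simp; omega) (by simp; omega)⟩
  by_cases h3 : c = '<'
  · subst h3
    simp only [deltaB, Char.reduceEq, reduceIte, Option.some.injEq] at hd
    subst hd
    simp only [santaGo, Char.reduceEq, reduceIte, Option.map_some]
    by_cases hpos : s.east > 0
    · rw [if_pos hpos]
      exact ⟨_, rfl, key _ rfl (by simp; omega) (by simp; omega) (by simp; omega) (by simp; omega)⟩
    · rw [if_neg hpos]
      exact ⟨_, rfl, key _ rfl (by simp; omega) (by simp; omega) (by simp; omega) (by simp; omega)⟩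
  by_cases h4 : c = '>'
  · subst h4
    simp only [deltaB, Char.reduceEq, reduceIte, Option.some.injEq] at hd
    subst hd
    simp only [santaGo, Char.reduceEq, reduceIte, Option.map_some]
    by_cases hpos : s.west > 0
    · rw [if_pos hpos]
      exact ⟨_, rfl, key _ rfl (by simp; omega) (by simp; omega) (by simp; omega) (by simp; omega)⟩
    · rw [if_neg hpos]
      exact ⟨_, rfl, key _ rfl (by simp; omega) (by simp; omega) (by simp; omega) (by simp; omega)⟩
  · simp [deltaB, h1, h2, h3, h4] at hd

-- swapping the two santas and the toggle commutes with A's loop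
def swap3 (x : SantaSt × SantaSt × Bool) : SantaSt × SantaSt × Bool := (x.2.1, x.1, !x.2.2)

lemma stepA_swap (acc : Option (SantaSt × SantaSt × Bool)) (c : Char) :
    stepA (acc.map swap3) c = (stepA acc c).map swap3 := by
  cases acc with
  | none => rfl
  | some x =>
    obtain ⟨sa, ra, fl⟩ := x
    cases fl <;> simp [stepA, swap3, Option.map_map] <;> rfl

lemma foldl_swap (l : List Char) (acc : Option (SantaSt × SantaSt × Bool)) :
    l.foldl stepA (acc.map swap3) = (l.foldl stepA acc).map swap3 := by
  induction l generalizing acc with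
  | nil => rfl
  | cons c t ih => rw [List.foldl_cons, List.foldl_cons, stepA_swap, ih]

lemma everyOther_cons {α : Type} (d : α) (t : List α) :
    everyOther (d :: t) = d :: everyOther (t.drop 1) := by
  cases t <;> rfl

-- main invariant: A's interleaved loop visits, per santa, exactly the deinterleaved paths
lemma foldl_runA (l : List Char) (hl : ∀ c ∈ l, (deltaB c).isSome)
    (sa ra : SantaSt) (p r : Int × Int) (w1 w2 : List (Int × Int))
    (h1 : SRel sa p w1) (h2 : SRel ra r w2) :
    ∃ sa' ra' fl' p' r',
      l.foldl stepA (some (sa, ra, true)) = some (sa', ra', fl') ∧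
      SRel sa' p' (PySem.Set.update w1 (pathFrom p (everyOther (l.map dlt)))) ∧
      SRel ra' r' (PySem.Set.update w2 (pathFrom r (everyOther ((l.map dlt).drop 1)))) := by
  induction l generalizing sa ra p r w1 w2 with
  | nil => exact ⟨sa, ra, true, p, r, rfl, h1, h2⟩
  | cons c t ih =>
    obtain ⟨d, hd⟩ := Option.isSome_iff_exists.mp (hl c (List.mem_cons_self))
    have ht : ∀ c ∈ t, (deltaB c).isSome := fun c hc => hl c (List.mem_cons_of_mem _ hc)
    obtain ⟨sa1, hgo, hrel1⟩ := santaGo_rel hd h1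
    have hstep : stepA (some (sa, ra, true)) c = some (sa1, ra, false) := by
      simp [stepA, hgo]
    obtain ⟨ra2, sa2, fl2, r2, p2, hfold, hR, hS⟩ :=
      ih ht ra sa1 r (p.1 + d.1, p.2 + d.2) w2 (PySem.Set.add w1 (p.1 + d.1, p.2 + d.2)) h2 hrel1
    refine ⟨sa2, ra2, !fl2, p2, r2, ?_, ?_, ?_⟩
    · rw [List.foldl_cons, hstep]
      have : (some (sa1, ra, false) : Option (SantaSt × SantaSt × Bool)) =
          (some (ra, sa1, true)).map swap3 := rfl
      rw [this, foldl_swap, hfold]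
      rfl
    · have hdc : dlt c = d := by simp [dlt, hd]
      rw [List.map_cons, hdc, everyOther_cons, pathFrom]
      simpa [PySem.Set.update] using hS
    · simpa using hR

-- the valid-input hypothesis makes B's translation pass succeed with map dlt
lemma deltasB_eq (l : List Char) (hl : ∀ c ∈ l, (deltaB c).isSome) :
    deltasB l = some (l.map dlt) := by
  induction l with
  | nil => rfl
  | cons c t ih =>
    obtain ⟨d, hd⟩ := Option.isSome_iff_exists.mp (hl c (List.mem_cons_self))
    have ht := ih (fun c hc => hl c (List.mem_cons_of_mem _ hc))
    simp [deltasB] at ht ⊢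
    simp [hd, ht, dlt]

-- B's append-accumulating path loop computes pathFrom
lemma pathB_aux (ds : List (Int × Int)) (p : Int × Int) (acc : List (Int × Int)) :
    (ds.foldl (fun (st : (Int × Int) × List (Int × Int)) d =>
      ((st.1.1 + d.1, st.1.2 + d.2), st.2 ++ [(st.1.1 + d.1, st.1.2 + d.2)])) (p, acc)).2 =
    acc ++ pathFrom p ds := by
  induction ds generalizing p acc with
  | nil => simp [pathFrom]
  | cons d t ih => simp [pathFrom, ih]

lemma pathB_eq (ds : List (Int × Int)) : pathB ds = pathFrom (0, 0) ds := by
  simpa [pathB] using pathB_aux ds (0, 0) []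

lemma update_length (w1 w2 : List (Int × Int)) (vis : PySem.Set (Int × Int))
    (h1 : w1.Nodup) (hvn : vis.Nodup) (hv : ∀ q, q ∈ vis ↔ q ∈ w1 ∨ q ∈ w2) :
    (PySem.Set.update (w1.map enc) (w2.map enc)).length = vis.length := by
  have hmn : (vis.map enc).Nodup := hvn.map enc_inj
  have hun : (PySem.Set.update (w1.map enc) (w2.map enc)).Nodup :=
    PySem.Set.nodup_update _ _ (h1.map enc_inj)
  have hperm : (PySem.Set.update (w1.map enc) (w2.map enc)).Perm (vis.map enc) := by
    rw [List.perm_ext_iff_of_nodup hun hmn]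
    intro x
    rw [PySem.Set.mem_update]
    constructor
    · rintro (hx | hx) <;>
      · rcases List.mem_map.mp hx with ⟨q, hq, rfl⟩
        exact List.mem_map_of_mem ((hv q).mpr (by tauto))
    · intro hx
      rcases List.mem_map.mp hx with ⟨q, hq, rfl⟩
      rcases (hv q).mp hq with h | h
      · exact Or.inl (List.mem_map_of_mem h)
      · exact Or.inr (List.mem_map_of_mem h)
  rw [hperm.length_eq, List.length_map]

-- ===== VERDICT (by name: the statement is the Claim_ definition above) =====
theorem part_2_spec : Claim_equal_part_2 := by
  intro source _ hpre
  unfold Spec_part_2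
  have hl : ∀ c ∈ source.toList, (deltaB c).isSome := by
    intro c hc
    have h4 := List.all_eq_true.mp hpre c hc
    simp only [Bool.or_eq_true, beq_iff_eq] at h4
    rcases h4 with ((h | h) | h) | h <;> simp [deltaB, h]
  have hinit : SRel santaInit (0, 0) [((0 : Int), (0 : Int))] := by
    refine ⟨rfl, rfl, rfl, rfl, ?_, by decide⟩
    decide
  obtain ⟨sa', ra', fl', p', r', hA, hR1, hR2⟩ :=
    foldl_runA source.toList hl santaInit santaInit (0, 0) (0, 0)
      [((0 : Int), (0 : Int))] [((0 : Int), (0 : Int))] hinit hinit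
  set ds := source.toList.map dlt with hds
  unfold part_2 part_2_alt
  rw [hA, deltasB_eq source.toList hl]
  dsimp only
  set W1 := PySem.Set.update [((0 : Int), (0 : Int))] (pathFrom (0, 0) (everyOther ds)) with hW1
  set W2 := PySem.Set.update [((0 : Int), (0 : Int))] (pathFrom (0, 0) (everyOther (ds.drop 1))) with hW2
  have hmerge : (ra'.locations.items.foldl
      (fun d kv => d.modify kv.1 0 (· + kv.2)) sa'.locations).keys =
      PySem.Set.update sa'.locations.keys (ra'.locations.items.map Prod.fst) :=
    PySem.Dict.keys_foldl_modify_key ra'.locations.items Prod.fst 0 (fun _ kv => (· + kv.2)) sa'.locations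
  have hsize : ∀ d : PySem.Dict (Int × Int × Int × Int) Int, d.size = d.keys.length := by
    intro d
    simp [PySem.Dict.size, PySem.Dict.keys]
  rw [hsize, hmerge, hR1.2.2.2.2.1,
    show (ra'.locations.items.map Prod.fst) = ra'.locations.keys from rfl, hR2.2.2.2.2.1]
  -- B's set has the same elements as the union of the two ghost visited lists
  have hone : ([((0 : Int), (0 : Int))] : List (Int × Int)).Nodup := by decide
  have hB := update_length W1 W2
    (PySem.Set.update (PySem.Set.update (PySem.Set.ofList [((0 : Int), (0 : Int))])
        (pathB (everyOther ds))) (pathB (everyOther (ds.drop 1))))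
    (PySem.Set.nodup_update _ _ hone)
    (PySem.Set.nodup_update _ _ (PySem.Set.nodup_update _ _ (by decide)))
    (by
      intro q
      have hof : PySem.Set.ofList [((0 : Int), (0 : Int))] = [((0 : Int), (0 : Int))] := by decide
      rw [PySem.Set.mem_update, PySem.Set.mem_update, hof, hW1, hW2,
        PySem.Set.mem_update, PySem.Set.mem_update, pathB_eq, pathB_eq]
      tauto)
  rw [hB]
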